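-- pv_equiv track=rewrite | github.com/pypi-data/pypi-mirror-401 | packages/Amazon-monitor/amazon_monitor-0.1.3-py3-none-any.whl/app/terminal_ui.py | _create_scrollbar
-- ===== SOURCE A (Python) =====
-- def _create_scrollbar(total_lines: int, visible_lines: int, scroll_pos: int) -> str:
--     """创建滚动条指示器"""
--     if total_lines <= visible_lines:
--         return ""
--
--     # 计算滚动条位置
--     scrollbar_height = visible_lines - 2  # 减去上下箭头
--     if scrollbar_height < 1:
--         return ""
--
--     # 计算滑块位置和大小
--     thumb_size = max(1, int(scrollbar_height * visible_lines / total_lines))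
--     thumb_pos = int((scrollbar_height - thumb_size) * scroll_pos / max(total_lines - visible_lines, 1))
--
--     # 构建滚动条
--     scrollbar = "▲\n"
--     for i in range(scrollbar_height):
--         if thumb_pos <= i < thumb_pos + thumb_size:
--             scrollbar += "█\n"
--         else:
--             scrollbar += "░\n"
--     scrollbar += "▼"
--
--     return scrollbar
-- ===== SOURCE B (Python) =====
-- def _create_scrollbar(total_lines: int, visible_lines: int, scroll_pos: int) -> str:
--     """创建滚动条指示器"""
--     if total_lines <= visible_lines:
--         return ""
--     scrollbar_height = visible_lines - 2
--     if scrollbar_height < 1: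
--         return ""
--     thumb_size = max(1, int(scrollbar_height * visible_lines / total_lines))
--     thumb_pos = int((scrollbar_height - thumb_size) * scroll_pos / max(total_lines - visible_lines, 1))
--     # run-length construction instead of a per-row loop with a branch
--     lead = max(0, min(thumb_pos, scrollbar_height))
--     mid = max(0, min(thumb_pos + thumb_size, scrollbar_height) - lead)
--     tail = scrollbar_height - lead - mid
--     return "▲\n" + "░\n" * lead + "█\n" * mid + "░\n" * tail + "▼"
-- ===== Notes on version B (the rewrite author's own statement) =====
-- stated objective: simpler
-- what changed: Replaced the per-row loop with its inside/outside-thumb branch by computing three clamped run lengths (lead/thumb/tail) and building the bar by string repetition.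
import Mathlib
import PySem

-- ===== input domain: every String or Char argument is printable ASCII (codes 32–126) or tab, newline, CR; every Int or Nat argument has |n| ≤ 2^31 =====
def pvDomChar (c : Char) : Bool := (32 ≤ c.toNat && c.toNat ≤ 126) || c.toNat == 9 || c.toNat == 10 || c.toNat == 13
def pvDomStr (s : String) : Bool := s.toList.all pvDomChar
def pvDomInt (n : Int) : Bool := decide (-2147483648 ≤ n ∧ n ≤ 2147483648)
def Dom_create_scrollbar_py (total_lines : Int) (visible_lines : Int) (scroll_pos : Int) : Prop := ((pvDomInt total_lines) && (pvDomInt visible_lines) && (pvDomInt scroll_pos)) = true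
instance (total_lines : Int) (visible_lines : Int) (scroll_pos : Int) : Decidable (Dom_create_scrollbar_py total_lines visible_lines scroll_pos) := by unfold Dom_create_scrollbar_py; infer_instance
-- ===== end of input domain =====

-- B replaces A's per-row loop with a three-run-length (lead/thumb/tail) string construction; objective: simpler.
-- Python's int(x*y/z) on floats is modelled as exact truncated integer division (Int.tdiv); exact whenever the
-- double-precision quotient truncates like the rational one.

-- ===== PORT A =====
def create_scrollbar_py (total_lines : Int) (visible_lines : Int) (scroll_pos : Int) : String :=
  if total_lines ≤ visible_lines then ""
  else
    let scrollbar_height := visible_lines - 2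
    if scrollbar_height < 1 then ""
    else
      let thumb_size := max 1 ((scrollbar_height * visible_lines).tdiv total_lines)
      let thumb_pos := ((scrollbar_height - thumb_size) * scroll_pos).tdiv (max (total_lines - visible_lines) 1)
      let scrollbar :=
        (PySem.List.pyRange 0 scrollbar_height 1).foldl
          (fun acc i =>
            if thumb_pos ≤ i ∧ i < thumb_pos + thumb_size then acc ++ "█\n" else acc ++ "░\n")
          "▲\n"
      scrollbar ++ "▼"

-- ===== PORT B =====
-- port of Python's  s * n  (string repetition)
def pvRep (s : String) (n : Int) : String := String.join (List.replicate n.toNat s)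

def create_scrollbar_py_alt (total_lines : Int) (visible_lines : Int) (scroll_pos : Int) : String :=
  if total_lines ≤ visible_lines then ""
  else
    let scrollbar_height := visible_lines - 2
    if scrollbar_height < 1 then ""
    else
      let thumb_size := max 1 ((scrollbar_height * visible_lines).tdiv total_lines)
      let thumb_pos := ((scrollbar_height - thumb_size) * scroll_pos).tdiv (max (total_lines - visible_lines) 1)
      let lead := max 0 (min thumb_pos scrollbar_height)
      let mid := max 0 (min (thumb_pos + thumb_size) scrollbar_height - lead)
      let tail := scrollbar_height - lead - mid
      "▲\n" ++ pvRep "░\n" lead ++ pvRep "█\n" mid ++ pvRep "░\n" tail ++ "▼"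

-- ===== PRECONDITION & SPEC =====
def Spec_create_scrollbar_py (total_lines : Int) (visible_lines : Int) (scroll_pos : Int) (out : String) : Prop := out = create_scrollbar_py_alt total_lines visible_lines scroll_pos
instance (total_lines : Int) (visible_lines : Int) (scroll_pos : Int) (out : String) : Decidable (Spec_create_scrollbar_py total_lines visible_lines scroll_pos out) := by unfold Spec_create_scrollbar_py; infer_instance

-- ===== CLAIM (what is proved, stated in full; the proofs are below) =====
def Claim_equal_create_scrollbar_py : Prop := ∀ (total_lines : Int) (visible_lines : Int) (scroll_pos : Int), Dom_create_scrollbar_py total_lines visible_lines scroll_pos → Spec_create_scrollbar_py total_lines visible_lines scroll_pos (create_scrollbar_py total_lines visible_lines scroll_pos)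

-- ===== LEMMAS AND PROOFS =====

theorem pvRep_zero (s : String) : pvRep s 0 = "" := by simp [pvRep, String.join]

theorem pvRep_succ (s : String) (k : Int) (hk : 0 ≤ k) : pvRep s (k + 1) = pvRep s k ++ s := by
  have h1 : (k + 1).toNat = k.toNat + 1 := by omega
  simp [pvRep, h1, List.replicate_succ', String.join, List.foldl_append]

-- the per-row loop of A produces exactly the lead/thumb/tail run-length string of B
theorem pvLoop_runs (p s : Int) (hs : 1 ≤ s) (init : String) : ∀ (n : Nat),
    (PySem.List.pyRange 0 (n : Int) 1).foldl
      (fun acc i => if p ≤ i ∧ i < p + s then acc ++ "█\n" else acc ++ "░\n") init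
    = init ++ pvRep "░\n" (max 0 (min p n))
        ++ pvRep "█\n" (max 0 (min (p + s) n - max 0 (min p n)))
        ++ pvRep "░\n" ((n : Int) - max 0 (min p n) - max 0 (min (p + s) n - max 0 (min p n))) := by
  intro n
  induction n with
  | zero =>
      simp [PySem.List.pyRange_one_eq_nil, pvRep_zero]
  | succ n ih =>
      have hcast : ((n + 1 : Nat) : Int) = (n : Int) + 1 := by push_cast; ring
      have hsplit : PySem.List.pyRange 0 ((n : Int) + 1) 1
          = PySem.List.pyRange 0 (n : Int) 1 ++ [(n : Int)] :=
        PySem.List.pyRange_one_succ_right (by positivity)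
      rw [hcast, hsplit, List.foldl_append, ih]
      simp only [List.foldl_cons, List.foldl_nil]
      by_cases h1 : p ≤ (n : Int)
      · by_cases h2 : (n : Int) < p + s
        · -- inside the thumb
          rw [if_pos ⟨h1, h2⟩]
          rw [show max 0 (min p ((n : Int) + 1)) = max 0 (min p (n : Int)) from by omega]
          rw [show max 0 (min (p + s) ((n : Int) + 1) - max 0 (min p (n : Int)))
              = max 0 (min (p + s) (n : Int) - max 0 (min p (n : Int))) + 1 from by omega]
          rw [show ((n : Int) + 1) - max 0 (min p (n : Int))
                - (max 0 (min (p + s) (n : Int) - max 0 (min p (n : Int))) + 1) = 0 from by omega]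
          rw [show (n : Int) - max 0 (min p (n : Int))
                - max 0 (min (p + s) (n : Int) - max 0 (min p (n : Int))) = 0 from by omega]
          rw [pvRep_succ _ _ (by omega), pvRep_zero]
          simp [String.append_assoc]
        · -- past the thumb
          rw [if_neg (by tauto)]
          rw [show max 0 (min p ((n : Int) + 1)) = max 0 (min p (n : Int)) from by omega]
          rw [show max 0 (min (p + s) ((n : Int) + 1) - max 0 (min p (n : Int)))
              = max 0 (min (p + s) (n : Int) - max 0 (min p (n : Int))) from by omega]
          rw [show ((n : Int) + 1) - max 0 (min p (n : Int))
                - max 0 (min (p + s) (n : Int) - max 0 (min p (n : Int)))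
              = ((n : Int) - max 0 (min p (n : Int))
                - max 0 (min (p + s) (n : Int) - max 0 (min p (n : Int)))) + 1 from by omega]
          rw [pvRep_succ _ _ (by omega)]
          simp [String.append_assoc]
      · -- before the thumb
        rw [if_neg (by tauto)]
        rw [show max 0 (min p ((n : Int) + 1)) = max 0 (min p (n : Int)) + 1 from by omega]
        rw [show max 0 (min (p + s) ((n : Int) + 1) - (max 0 (min p (n : Int)) + 1)) = 0 from by omega]
        rw [show max 0 (min (p + s) (n : Int) - max 0 (min p (n : Int))) = 0 from by omega]
        rw [show ((n : Int) + 1) - (max 0 (min p (n : Int)) + 1) - (0 : Int) = 0 from by omega]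
        rw [show (n : Int) - max 0 (min p (n : Int)) - (0 : Int) = 0 from by omega]
        rw [pvRep_succ _ _ (by omega)]
        simp [String.append_assoc, pvRep_zero]

-- ===== VERDICT (by name: the statement is the Claim_ definition above) =====
theorem create_scrollbar_py_spec : Claim_equal_create_scrollbar_py := by
  intro total_lines visible_lines scroll_pos _hdom
  unfold Spec_create_scrollbar_py create_scrollbar_py create_scrollbar_py_alt
  by_cases hg1 : total_lines ≤ visible_lines
  · simp [hg1]
  · rw [if_neg hg1, if_neg hg1]
    by_cases hg2 : visible_lines - 2 < 1
    · simp [hg2]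
    · rw [if_neg hg2, if_neg hg2]
      dsimp only
      have hn : visible_lines - 2 = (((visible_lines - 2).toNat : Nat) : Int) := by omega
      rw [hn]
      rw [pvLoop_runs _ _ (le_max_left _ _) "▲\n" (visible_lines - 2).toNat]
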